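-- pv_equiv track=rewrite | github.com/aravindas4/snippetbox-1 | array/sub_array.py | sum_of_sub_arrays
-- ===== SOURCE A (Python) =====
-- from typing import List
--
-- def sum_of_sub_arrays(nums: List[int], window: int):
--     # Initial
--     sub_array_sum = sum(nums[0:window])
--     result = [sub_array_sum]
--
--     if window > len(nums):
--         return result
--
--     for index in range(1, (len(nums)-window+1)):
--         sub_array_sum = sub_array_sum - nums[index - 1]  # remove last element
--         sub_array_sum = sub_array_sum + nums[index + window - 1]  # add new element
--
--         result.append(sub_array_sum)
--
--     return result
-- ===== SOURCE B (Python) =====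
-- from typing import List
--
-- def sum_of_sub_arrays(nums: List[int], window: int):
--     # prefix-sum table: pre[i] = sum(nums[:i])
--     pre = [0]
--     for x in nums:
--         pre.append(pre[-1] + x)
--     if window > len(nums):
--         return [pre[-1]]
--     return [pre[i + window] - pre[i] for i in range(len(nums) - window + 1)]
-- ===== Notes on version B (the rewrite author's own statement) =====
-- stated objective: alternative
-- what changed: Replaces the single sliding accumulator (subtract outgoing, add incoming element each step) with a prefix-sum table built once; each window sum is then a table difference pre[i+window]-pre[i] computed by an index comprehension.
import Mathlib
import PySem

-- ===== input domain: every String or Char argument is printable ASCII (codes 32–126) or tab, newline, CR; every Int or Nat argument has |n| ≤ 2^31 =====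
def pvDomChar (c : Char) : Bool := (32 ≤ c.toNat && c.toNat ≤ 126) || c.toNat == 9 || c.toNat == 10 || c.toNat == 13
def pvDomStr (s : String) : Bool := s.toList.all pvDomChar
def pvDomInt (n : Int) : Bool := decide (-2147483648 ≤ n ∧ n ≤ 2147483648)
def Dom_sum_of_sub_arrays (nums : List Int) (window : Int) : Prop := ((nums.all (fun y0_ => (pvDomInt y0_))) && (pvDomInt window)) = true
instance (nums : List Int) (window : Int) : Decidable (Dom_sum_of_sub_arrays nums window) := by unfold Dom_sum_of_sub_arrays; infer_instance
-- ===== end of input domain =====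

-- B builds a prefix-sum table once and reads each window sum off as a difference,
-- instead of A's single sliding accumulator; objective: alternative (same cost).

-- ===== PORT A =====
def sum_of_sub_arrays (nums : List Int) (window : Int) : List Int :=
  let s0 := (PySem.List.slice nums (some 0) (some window)).sum
  if window > (nums.length : Int) then [s0]
  else
    ((PySem.List.pyRange 1 ((nums.length : Int) - window + 1) 1).foldl
      (fun (st : Int × List Int) index =>
        let s1 := st.1 - PySem.List.pyGetD nums (index - 1) 0
        let s2 := s1 + PySem.List.pyGetD nums (index + window - 1) 0
        (s2, st.2 ++ [s2])) (s0, [s0])).2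

-- ===== PORT B =====
def sum_of_sub_arrays_alt (nums : List Int) (window : Int) : List Int :=
  let pre := nums.foldl (fun acc x => acc ++ [PySem.List.pyGetD acc (-1) 0 + x]) [0]
  if window > (nums.length : Int) then [PySem.List.pyGetD pre (-1) 0]
  else
    (PySem.List.pyRange 0 ((nums.length : Int) - window + 1) 1).map
      (fun i => PySem.List.pyGetD pre (i + window) 0 - PySem.List.pyGetD pre i 0)

-- ===== PRECONDITION & SPEC =====
-- Pre_ excludes only negative window, on which Python A raises IndexError
-- (the loop's index - 1 runs past the end of nums).
def Pre_sum_of_sub_arrays (nums : List Int) (window : Int) : Prop := 0 ≤ window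
instance (nums : List Int) (window : Int) : Decidable (Pre_sum_of_sub_arrays nums window) := by unfold Pre_sum_of_sub_arrays; infer_instance
def pvWitness_sum_of_sub_arrays : List Int × Int := ([1, -2, 3, 4], 2)

def Spec_sum_of_sub_arrays (nums : List Int) (window : Int) (out : List Int) : Prop := out = sum_of_sub_arrays_alt nums window
instance (nums : List Int) (window : Int) (out : List Int) : Decidable (Spec_sum_of_sub_arrays nums window out) := by unfold Spec_sum_of_sub_arrays; infer_instance

-- ===== CLAIM (what is proved, stated in full; the proofs are below) =====
def Claim_equal_sum_of_sub_arrays : Prop := ∀ (nums : List Int) (window : Int), Dom_sum_of_sub_arrays nums window → Pre_sum_of_sub_arrays nums window → Spec_sum_of_sub_arrays nums window (sum_of_sub_arrays nums window)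

-- ===== LEMMAS AND PROOFS =====

-- The prefix-sum table B builds is the list of partial sums.
theorem pre_spec (nums : List Int) (acc : List Int) (s : Int) :
    nums.foldl (fun acc x => acc ++ [PySem.List.pyGetD acc (-1) 0 + x]) (acc ++ [s])
      = acc ++ (List.range (nums.length + 1)).map (fun i => s + (nums.take i).sum) := by
  induction nums generalizing acc s with
  | nil => simp
  | cons x xs ih =>
      simp only [List.foldl_cons, PySem.List.pyGetD_neg_one_append_singleton]
      rw [ih, List.append_assoc]
      simp [List.range_succ_eq_map, List.map_map, Function.comp_def, add_assoc]

theorem take_sum_succ (nums : List Int) (j : Nat) (h : j < nums.length) :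
    (nums.take (j + 1)).sum = (nums.take j).sum + nums[j] := by
  rw [List.take_add_one, List.getElem?_eq_getElem h, List.sum_append]
  norm_num

-- A's loop invariant: after t iterations the accumulator holds the t-th window sum
-- and the result list holds the first t+1 window sums.
theorem loopA (nums : List Int) (k t : Nat) (ht : t + k ≤ nums.length) :
    ((PySem.List.pyRange 1 (1 + (t : Int)) 1).foldl
      (fun (st : Int × List Int) index =>
        let s1 := st.1 - PySem.List.pyGetD nums (index - 1) 0
        let s2 := s1 + PySem.List.pyGetD nums (index + (k : Int) - 1) 0
        (s2, st.2 ++ [s2]))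
      ((nums.take k).sum, [(nums.take k).sum]))
    = ((nums.take (t + k)).sum - (nums.take t).sum,
       (List.range (t + 1)).map (fun i => (nums.take (i + k)).sum - (nums.take i).sum)) := by
  induction t with
  | zero => simp [PySem.List.pyRange_one_eq_nil]
  | succ t ih =>
      have h1 : (1 : Int) ≤ 1 + (t : Int) := by omega
      have : (1 : Int) + ((t : Nat) + 1 : Nat) = (1 + (t : Int)) + 1 := by push_cast; ring
      rw [this, PySem.List.pyRange_one_succ_right h1, List.foldl_append,
        ih (by omega)]
      simp only [List.foldl_cons, List.foldl_nil]
      have hti : (1 : Int) + (t : Int) - 1 = ((t : Nat) : Int) := by push_cast; ring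
      have htk : (1 : Int) + (t : Int) + (k : Int) - 1 = (((t + k : Nat)) : Int) := by push_cast; ring
      have htlt : t < nums.length := by omega
      have htklt : t + k < nums.length := by omega
      rw [hti, htk, PySem.List.pyGetD_natCast, PySem.List.pyGetD_natCast,
        List.getD_eq_getElem _ _ htlt, List.getD_eq_getElem _ _ htklt]
      rw [Prod.mk.injEq]
      refine ⟨?_, ?_⟩
      · rw [take_sum_succ nums t htlt, show t + 1 + k = (t + k) + 1 from by omega,
          take_sum_succ nums (t + k) htklt]
        ring
      · have hW : (List.take (t + 1 + k) nums).sum - (List.take (t + 1) nums).sum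
            = (List.take (t + k) nums).sum - (List.take t nums).sum - nums[t] + nums[t + k] := by
          rw [take_sum_succ nums t htlt, show t + 1 + k = (t + k) + 1 from by omega,
            take_sum_succ nums (t + k) htklt]
          ring
        simp [List.range_succ, hW]

theorem getD_pre (nums : List Int) (j : Nat) (h : j ≤ nums.length) :
    ((List.range (nums.length + 1)).map (fun i => (0 : Int) + (nums.take i).sum)).getD j 0
      = (nums.take j).sum := by
  rw [List.getD_eq_getElem _ _ (by simp; omega)]
  simp

-- ===== VERDICT (by name: the statement is the Claim_ definition above) =====
theorem sum_of_sub_arrays_spec : Claim_equal_sum_of_sub_arrays := by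
  intro nums window _ hpre
  unfold Spec_sum_of_sub_arrays sum_of_sub_arrays sum_of_sub_arrays_alt
  have hpre' : 0 ≤ window := hpre
  obtain ⟨k, rfl⟩ := Int.eq_ofNat_of_zero_le hpre'
  have hpre_eq : nums.foldl (fun acc x => acc ++ [PySem.List.pyGetD acc (-1) 0 + x]) [0]
      = (List.range (nums.length + 1)).map (fun i => (0 : Int) + (nums.take i).sum) := by
    simpa using pre_spec nums [] 0
  simp only [hpre_eq]
  have hs0 : (PySem.List.slice nums (some 0) (some (k : Int))).sum = (nums.take k).sum := by
    rw [PySem.List.slice_zero_start, PySem.List.slice_to_natCast]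
  by_cases hk : (k : Int) > (nums.length : Int)
  · -- window exceeds the length: both return the total sum, singleton
    simp only [if_pos hk]
    have hlast : PySem.List.pyGetD
        ((List.range (nums.length + 1)).map (fun i => (0 : Int) + (nums.take i).sum)) (-1) 0
        = nums.sum := by
      rw [List.range_succ, List.map_append]
      simp [PySem.List.pyGetD_neg_one_append_singleton]
    rw [hlast, hs0, List.take_of_length_le (by exact_mod_cast le_of_lt hk)]
  · -- main case: k ≤ len
    have hkle : k ≤ nums.length := by omega
    simp only [if_neg hk]
    have hend : (nums.length : Int) - (k : Int) + 1 = (1 : Int) + ((nums.length - k : Nat) : Int) := by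
      omega
    rw [hs0, hend, loopA nums k (nums.length - k) (by omega)]
    rw [show (1 : Int) + ((nums.length - k : Nat) : Int) = (0 : Int) + (((nums.length - k + 1 : Nat)) : Int) from by push_cast; ring]
    rw [show (0:Int) + (((nums.length - k + 1 : Nat)) : Int) = (((nums.length - k + 1 : Nat)) : Int) from by ring]
    rw [PySem.List.pyRange_zero_natCast]
    rw [List.map_map]
    apply List.map_congr_left
    intro i hi
    simp only [List.mem_range] at hi
    simp only [Function.comp]
    rw [show ((i : Int) + (k : Int)) = (((i + k : Nat)) : Int) from by push_cast; ring]
    rw [PySem.List.pyGetD_natCast, PySem.List.pyGetD_natCast,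
      getD_pre nums (i + k) (by omega), getD_pre nums i (by omega)]
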